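-- pv_equiv track=rewrite | github.com/noorharidy19/EcoVision | 2d-floorplan/modeltest.py | auto_label_room
-- ===== SOURCE A (Python) =====
-- def auto_label_room(room, all_furniture):
--     # Find all furniture whose centroid is near this room
--     # (Simple version: check if the furniture is linked to the room_id)
--     items_in_room = [f['type'] for f in all_furniture if f.get('room_id') == room['id']]
--
--     if any(x in items_in_room for x in ["toilet", "sink_bathroom", "bathtub","shower_stall"]):
--         return "bathroom"
--     if any(x in items_in_room for x in ["sink_kitchen", "refrigerator", "oven_range"]):
--         return "kitchen"
--     if any(x in items_in_room for x in ["sofa_small", "sofa_large", "sofa_loveseat","side_table","armchair","chair_modern"]):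
--         return "living_room"
--     if any(x in items_in_room for x in ["dining_plate", "dining_table_set"]):
--         return "dining_room"
--     if "bed" in items_in_room:
--         return "bedroom"
--
--     return room['type'] # Keep original if no furniture match
-- ===== SOURCE B (Python) =====
-- LABELS = ["bathroom", "kitchen", "living_room", "dining_room", "bedroom"]
-- RANK = {
--     "toilet": 0, "sink_bathroom": 0, "bathtub": 0, "shower_stall": 0,
--     "sink_kitchen": 1, "refrigerator": 1, "oven_range": 1,
--     "sofa_small": 2, "sofa_large": 2, "sofa_loveseat": 2,
--     "side_table": 2, "armchair": 2, "chair_modern": 2,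
--     "dining_plate": 3, "dining_table_set": 3,
--     "bed": 4,
-- }
--
-- def auto_label_room(room, all_furniture):
--     # min-reduction over numeric priority ranks; 5 = no recognised furniture
--     best = 5
--     for f in all_furniture:
--         if f.get('room_id') == room['id']:
--             best = min(best, RANK.get(f['type'], 5))
--     if best < 5:
--         return LABELS[best]
--     return room['type']
-- ===== Notes on version B (the rewrite author's own statement) =====
-- stated objective: alternative
-- what changed: Replaces the intermediate type list and five separate any(...) membership scans with a single min-reduction: each furniture type is mapped to a numeric priority rank and the loop keeps the smallest rank of any matching furniture, finally indexing a label array (arithmetic minimum instead of staged membership tests).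
import Mathlib
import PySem

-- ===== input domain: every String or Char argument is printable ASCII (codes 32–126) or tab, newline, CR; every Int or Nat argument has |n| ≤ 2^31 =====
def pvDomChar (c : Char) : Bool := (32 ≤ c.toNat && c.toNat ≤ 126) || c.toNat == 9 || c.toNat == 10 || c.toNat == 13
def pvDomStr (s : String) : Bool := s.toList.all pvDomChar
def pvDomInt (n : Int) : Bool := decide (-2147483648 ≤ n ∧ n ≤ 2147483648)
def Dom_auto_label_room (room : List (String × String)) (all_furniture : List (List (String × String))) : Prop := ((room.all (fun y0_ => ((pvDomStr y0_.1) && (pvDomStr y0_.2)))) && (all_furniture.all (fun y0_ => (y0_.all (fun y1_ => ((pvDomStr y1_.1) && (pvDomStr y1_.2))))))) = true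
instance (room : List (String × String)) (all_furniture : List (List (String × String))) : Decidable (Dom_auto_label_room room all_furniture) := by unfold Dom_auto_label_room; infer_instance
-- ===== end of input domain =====

-- B replaces the intermediate type list and five any(...) scans by one min-reduction over
-- numeric priority ranks, then indexes a label array (objective: alternative).


-- ===== PORT A =====
-- Where Python A raises a KeyError (room['id'] with furniture present, f['type'] on a matching
-- furniture, room['type'] with no category match) the port uses a getD "" default; Pre_ excludes those inputs.
def auto_label_room (room : List (String × String)) (all_furniture : List (List (String × String))) : String :=
  let items_in_room :=
    (all_furniture.filter (fun f =>
      (PySem.Dict.mk f).get? "room_id" == (PySem.Dict.mk room).get? "id")).map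
      (fun f => (PySem.Dict.mk f).getD "type" "")
  if (["toilet", "sink_bathroom", "bathtub", "shower_stall"].any (fun x => items_in_room.contains x)) then "bathroom"
  else if (["sink_kitchen", "refrigerator", "oven_range"].any (fun x => items_in_room.contains x)) then "kitchen"
  else if (["sofa_small", "sofa_large", "sofa_loveseat", "side_table", "armchair", "chair_modern"].any (fun x => items_in_room.contains x)) then "living_room"
  else if (["dining_plate", "dining_table_set"].any (fun x => items_in_room.contains x)) then "dining_room"
  else if items_in_room.contains "bed" then "bedroom"
  else (PySem.Dict.mk room).getD "type" ""

-- ===== PORT B =====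
def pvLabels : List String := ["bathroom", "kitchen", "living_room", "dining_room", "bedroom"]

def pvRankList : List (String × Int) :=
  [("toilet", 0), ("sink_bathroom", 0), ("bathtub", 0), ("shower_stall", 0),
   ("sink_kitchen", 1), ("refrigerator", 1), ("oven_range", 1),
   ("sofa_small", 2), ("sofa_large", 2), ("sofa_loveseat", 2),
   ("side_table", 2), ("armchair", 2), ("chair_modern", 2),
   ("dining_plate", 3), ("dining_table_set", 3),
   ("bed", 4)]

def pvRank : PySem.Dict String Int := PySem.Dict.mk pvRankList

def auto_label_room_alt (room : List (String × String)) (all_furniture : List (List (String × String))) : String :=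
  let best : Int :=
    all_furniture.foldl (fun best f =>
      if (PySem.Dict.mk f).get? "room_id" == (PySem.Dict.mk room).get? "id" then
        min best (pvRank.getD ((PySem.Dict.mk f).getD "type" "") 5)
      else best) 5
  if best < 5 then (PySem.List.pyGet? pvLabels best).getD ""
  else (PySem.Dict.mk room).getD "type" ""

-- ===== PRECONDITION & SPEC =====
-- Pre_ excludes exactly the inputs where Python A raises a KeyError: room without 'id' while
-- furniture is present, a matching furniture without 'type', or no category match and no 'type' in room.
def Pre_auto_label_room (room : List (String × String)) (all_furniture : List (List (String × String))) : Prop :=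
  (all_furniture = [] ∨ "id" ∈ (PySem.Dict.mk room).keys)
  ∧ (∀ f ∈ all_furniture, (PySem.Dict.mk f).get? "room_id" = (PySem.Dict.mk room).get? "id" → "type" ∈ (PySem.Dict.mk f).keys)
  ∧ ("type" ∈ (PySem.Dict.mk room).keys
     ∨ ∃ f ∈ all_furniture, (PySem.Dict.mk f).get? "room_id" = (PySem.Dict.mk room).get? "id"
        ∧ ∃ t ∈ pvRankList.map Prod.fst, (PySem.Dict.mk f).get? "type" = some t)
instance (room : List (String × String)) (all_furniture : List (List (String × String))) : Decidable (Pre_auto_label_room room all_furniture) := by unfold Pre_auto_label_room; infer_instance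

def pvWitness_auto_label_room : (List (String × String)) × (List (List (String × String))) :=
  ([("id", "r1"), ("type", "hall")], [[("room_id", "r1"), ("type", "bed")]])

def Spec_auto_label_room (room : List (String × String)) (all_furniture : List (List (String × String))) (out : String) : Prop := out = auto_label_room_alt room all_furniture
instance (room : List (String × String)) (all_furniture : List (List (String × String))) (out : String) : Decidable (Spec_auto_label_room room all_furniture out) := by unfold Spec_auto_label_room; infer_instance

-- ===== CLAIM (what is proved, stated in full; the proofs are below) =====
def Claim_equal_auto_label_room : Prop := ∀ (room : List (String × String)) (all_furniture : List (List (String × String))), Dom_auto_label_room room all_furniture → Pre_auto_label_room room all_furniture → Spec_auto_label_room room all_furniture (auto_label_room room all_furniture)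

-- ===== LEMMAS AND PROOFS =====

def pvCond (room f : List (String × String)) : Bool :=
  (PySem.Dict.mk f).get? "room_id" == (PySem.Dict.mk room).get? "id"
def pvTyp (f : List (String × String)) : String := (PySem.Dict.mk f).getD "type" ""
def pvRankT (t : String) : Int := pvRank.getD t 5

def pvG (room : List (String × String)) : Int → List (String × String) → Int :=
  fun best f => if pvCond room f then min best (pvRankT (pvTyp f)) else best

lemma alt_eq_fold (room : List (String × String)) (af : List (List (String × String))) :
    auto_label_room_alt room af =
      (if af.foldl (pvG room) 5 < 5 then (PySem.List.pyGet? pvLabels (af.foldl (pvG room) 5)).getD ""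
       else (PySem.Dict.mk room).getD "type" "") := rfl

lemma get?_rank_iff (t : String) (v : Int) : pvRank.get? t = some v ↔ (t, v) ∈ pvRankList := by
  have hnd : pvRank.keys.Nodup := by decide
  constructor
  · intro h; exact PySem.Dict.mem_items_of_get?_eq_some _ h
  · intro h; exact PySem.Dict.get?_of_mem_items _ h hnd

lemma rank_bounds (t : String) : 0 ≤ pvRankT t ∧ pvRankT t ≤ 5 := by
  rw [pvRankT, PySem.Dict.getD_eq_get?_getD]
  cases h : pvRank.get? t with
  | none => simp
  | some v =>
    rw [get?_rank_iff] at h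
    simp only [pvRankList, List.mem_cons, List.not_mem_nil, or_false, Prod.mk.injEq] at h
    rcases h with ⟨_,rfl⟩|⟨_,rfl⟩|⟨_,rfl⟩|⟨_,rfl⟩|⟨_,rfl⟩|⟨_,rfl⟩|⟨_,rfl⟩|⟨_,rfl⟩|⟨_,rfl⟩|⟨_,rfl⟩|⟨_,rfl⟩|⟨_,rfl⟩|⟨_,rfl⟩|⟨_,rfl⟩|⟨_,rfl⟩|⟨_,rfl⟩ <;> simp

lemma rank_eq_iff (t : String) (k : Int) (L : List String)
    (hk : k = 0 ∧ L = ["toilet", "sink_bathroom", "bathtub", "shower_stall"]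
        ∨ k = 1 ∧ L = ["sink_kitchen", "refrigerator", "oven_range"]
        ∨ k = 2 ∧ L = ["sofa_small", "sofa_large", "sofa_loveseat", "side_table", "armchair", "chair_modern"]
        ∨ k = 3 ∧ L = ["dining_plate", "dining_table_set"]
        ∨ k = 4 ∧ L = ["bed"]) :
    pvRankT t = k ↔ t ∈ L := by
  have hiff : ∀ v : Int, pvRank.get? t = some v ↔ (t, v) ∈ pvRankList := get?_rank_iff t
  rw [pvRankT, PySem.Dict.getD_eq_get?_getD]
  rcases hk with ⟨rfl, rfl⟩|⟨rfl, rfl⟩|⟨rfl, rfl⟩|⟨rfl, rfl⟩|⟨rfl, rfl⟩ <;>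
  · cases h : pvRank.get? t with
    | none =>
      simp only [Option.getD_none]
      constructor
      · intro h5; exact absurd h5 (by decide)
      · intro hL
        fin_cases hL <;> exact absurd h (by decide)
    | some v =>
      simp only [Option.getD_some]
      have hm := (hiff v).1 h
      simp only [pvRankList, List.mem_cons, List.not_mem_nil, or_false, Prod.mk.injEq] at hm
      rcases hm with ⟨rfl,rfl⟩|⟨rfl,rfl⟩|⟨rfl,rfl⟩|⟨rfl,rfl⟩|⟨rfl,rfl⟩|⟨rfl,rfl⟩|⟨rfl,rfl⟩|⟨rfl,rfl⟩|⟨rfl,rfl⟩|⟨rfl,rfl⟩|⟨rfl,rfl⟩|⟨rfl,rfl⟩|⟨rfl,rfl⟩|⟨rfl,rfl⟩|⟨rfl,rfl⟩|⟨rfl,rfl⟩ <;> decide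

lemma fold_le_iff (room : List (String × String)) (af : List (List (String × String)))
    (b k : Int) :
    af.foldl (pvG room) b ≤ k ↔ b ≤ k ∨ ∃ f ∈ af, pvCond room f = true ∧ pvRankT (pvTyp f) ≤ k := by
  induction af generalizing b with
  | nil => simp
  | cons a as ih =>
    simp only [List.foldl_cons, ih, List.mem_cons, pvG]
    by_cases hc : pvCond room a = true
    · simp only [hc, if_pos, min_le_iff]
      constructor
      · rintro (⟨h | h⟩ | ⟨f, hf, hcf, hr⟩)
        · exact Or.inl h
        · exact Or.inr ⟨a, Or.inl rfl, hc, h⟩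
        · exact Or.inr ⟨f, Or.inr hf, hcf, hr⟩
      · rintro (h | ⟨f, rfl | hf, hcf, hr⟩)
        · exact Or.inl (Or.inl h)
        · exact Or.inl (Or.inr hr)
        · exact Or.inr ⟨f, hf, hcf, hr⟩
    · rw [if_neg hc]
      constructor
      · rintro (h | ⟨f, hf, hcf, hr⟩)
        · exact Or.inl h
        · exact Or.inr ⟨f, Or.inr hf, hcf, hr⟩
      · rintro (h | ⟨f, rfl | hf, hcf, hr⟩)
        · exact Or.inl h
        · exact absurd hcf hc
        · exact Or.inr ⟨f, hf, hcf, hr⟩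

lemma fold_attained (room : List (String × String)) (af : List (List (String × String)))
    (b : Int) :
    af.foldl (pvG room) b = b ∨ ∃ f ∈ af, pvCond room f = true ∧ pvRankT (pvTyp f) = af.foldl (pvG room) b := by
  induction af generalizing b with
  | nil => simp
  | cons a as ih =>
    simp only [List.foldl_cons, List.mem_cons]
    rcases ih (pvG room b a) with h | ⟨f, hf, hcf, hr⟩
    · rw [h]
      simp only [pvG]
      by_cases hc : pvCond room a = true
      · rw [if_pos hc]
        rcases min_choice b (pvRankT (pvTyp a)) with hm | hm
        · exact Or.inl hm
        · exact Or.inr ⟨a, Or.inl rfl, hc, hm.symm⟩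
      · exact Or.inl (if_neg hc)
    · exact Or.inr ⟨f, Or.inr hf, hcf, hr⟩

-- A's membership test on the filtered-and-mapped type list, through matching furniture
lemma items_contains (room : List (String × String)) (af : List (List (String × String))) (x : String) :
    ((af.filter (fun f =>
      (PySem.Dict.mk f).get? "room_id" == (PySem.Dict.mk room).get? "id")).map
      (fun f => (PySem.Dict.mk f).getD "type" "")).contains x = true
    ↔ ∃ f ∈ af, pvCond room f = true ∧ pvTyp f = x := by
  simp [List.mem_filter, pvCond, pvTyp]
  aesop

lemma any_iff (room : List (String × String)) (af : List (List (String × String)))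
    (L : List String) :
    (L.any (fun x =>
      ((af.filter (fun f =>
        (PySem.Dict.mk f).get? "room_id" == (PySem.Dict.mk room).get? "id")).map
        (fun f => (PySem.Dict.mk f).getD "type" "")).contains x)) = true
    ↔ ∃ f ∈ af, pvCond room f = true ∧ pvTyp f ∈ L := by
  simp only [List.any_eq_true, items_contains]
  constructor
  · rintro ⟨x, hx, f, hf, hc, rfl⟩; exact ⟨f, hf, hc, hx⟩
  · rintro ⟨f, hf, hc, ht⟩; exact ⟨pvTyp f, ht, f, hf, hc, rfl⟩

lemma cat_false (room : List (String × String)) (af : List (List (String × String)))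
    (k : Int) (L : List String)
    (hk : k = 0 ∧ L = ["toilet", "sink_bathroom", "bathtub", "shower_stall"]
        ∨ k = 1 ∧ L = ["sink_kitchen", "refrigerator", "oven_range"]
        ∨ k = 2 ∧ L = ["sofa_small", "sofa_large", "sofa_loveseat", "side_table", "armchair", "chair_modern"]
        ∨ k = 3 ∧ L = ["dining_plate", "dining_table_set"]
        ∨ k = 4 ∧ L = ["bed"])
    (h : ¬ ∃ f ∈ af, pvCond room f = true ∧ pvRankT (pvTyp f) = k) :
    (L.any (fun x =>
      ((af.filter (fun f =>
        (PySem.Dict.mk f).get? "room_id" == (PySem.Dict.mk room).get? "id")).map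
        (fun f => (PySem.Dict.mk f).getD "type" "")).contains x)) = false := by
  rw [Bool.eq_false_iff]
  intro ht
  obtain ⟨g, hg, hcg, htg⟩ := (any_iff room af L).1 ht
  exact h ⟨g, hg, hcg, (rank_eq_iff _ k L hk).2 htg⟩

lemma cat_true (room : List (String × String)) (af : List (List (String × String)))
    (k : Int) (L : List String)
    (hk : k = 0 ∧ L = ["toilet", "sink_bathroom", "bathtub", "shower_stall"]
        ∨ k = 1 ∧ L = ["sink_kitchen", "refrigerator", "oven_range"]
        ∨ k = 2 ∧ L = ["sofa_small", "sofa_large", "sofa_loveseat", "side_table", "armchair", "chair_modern"]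
        ∨ k = 3 ∧ L = ["dining_plate", "dining_table_set"]
        ∨ k = 4 ∧ L = ["bed"])
    (h : ∃ f ∈ af, pvCond room f = true ∧ pvRankT (pvTyp f) = k) :
    (L.any (fun x =>
      ((af.filter (fun f =>
        (PySem.Dict.mk f).get? "room_id" == (PySem.Dict.mk room).get? "id")).map
        (fun f => (PySem.Dict.mk f).getD "type" "")).contains x)) = true := by
  obtain ⟨f, hf, hc, hrf⟩ := h
  exact (any_iff room af L).2 ⟨f, hf, hc, (rank_eq_iff _ k L hk).1 hrf⟩

lemma main_eq (room : List (String × String)) (af : List (List (String × String))) :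
    auto_label_room room af = auto_label_room_alt room af := by
  rw [alt_eq_fold]
  set r := af.foldl (pvG room) 5 with hr
  have hat := fold_attained room af 5
  rw [← hr] at hat
  have hbnd : 0 ≤ r ∧ r ≤ 5 := by
    rcases hat with h | ⟨f, _, _, h⟩
    · omega
    · have := rank_bounds (pvTyp f); omega
  have hno : ∀ k : Int, k < r → ¬ ∃ f ∈ af, pvCond room f = true ∧ pvRankT (pvTyp f) = k := by
    rintro k hk ⟨f, hf, hc, hrk⟩
    have : r ≤ k := (fold_le_iff room af 5 k).2 (Or.inr ⟨f, hf, hc, le_of_eq hrk⟩)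
    omega
  have hyes : r < 5 → ∃ f ∈ af, pvCond room f = true ∧ pvRankT (pvTyp f) = r := by
    intro h5
    rcases hat with h | h
    · omega
    · exact h
  obtain ⟨h0, h5⟩ := hbnd
  interval_cases r
  · have hT := cat_true room af 0 ["toilet", "sink_bathroom", "bathtub", "shower_stall"] (Or.inl ⟨rfl, rfl⟩) (hyes (by omega))
    simp only [auto_label_room, hT, if_true]
    rw [if_pos (by omega : (0:Int) < 5)]
    decide
  · have hF0 := cat_false room af 0 ["toilet", "sink_bathroom", "bathtub", "shower_stall"] (Or.inl ⟨rfl, rfl⟩) (hno 0 (by omega))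
    have hT := cat_true room af 1 ["sink_kitchen", "refrigerator", "oven_range"] (Or.inr (Or.inl ⟨rfl, rfl⟩)) (hyes (by omega))
    simp only [auto_label_room, hF0, hT, Bool.false_eq_true, if_false, if_true]
    rw [if_pos (by omega : (1:Int) < 5)]
    decide
  · have hF0 := cat_false room af 0 ["toilet", "sink_bathroom", "bathtub", "shower_stall"] (Or.inl ⟨rfl, rfl⟩) (hno 0 (by omega))
    have hF1 := cat_false room af 1 ["sink_kitchen", "refrigerator", "oven_range"] (Or.inr (Or.inl ⟨rfl, rfl⟩)) (hno 1 (by omega))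
    have hT := cat_true room af 2 ["sofa_small", "sofa_large", "sofa_loveseat", "side_table", "armchair", "chair_modern"] (Or.inr (Or.inr (Or.inl ⟨rfl, rfl⟩))) (hyes (by omega))
    simp only [auto_label_room, hF0, hF1, hT, Bool.false_eq_true, if_false, if_true]
    rw [if_pos (by omega : (2:Int) < 5)]
    decide
  · have hF0 := cat_false room af 0 ["toilet", "sink_bathroom", "bathtub", "shower_stall"] (Or.inl ⟨rfl, rfl⟩) (hno 0 (by omega))
    have hF1 := cat_false room af 1 ["sink_kitchen", "refrigerator", "oven_range"] (Or.inr (Or.inl ⟨rfl, rfl⟩)) (hno 1 (by omega))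
    have hF2 := cat_false room af 2 ["sofa_small", "sofa_large", "sofa_loveseat", "side_table", "armchair", "chair_modern"] (Or.inr (Or.inr (Or.inl ⟨rfl, rfl⟩))) (hno 2 (by omega))
    have hT := cat_true room af 3 ["dining_plate", "dining_table_set"] (Or.inr (Or.inr (Or.inr (Or.inl ⟨rfl, rfl⟩)))) (hyes (by omega))
    simp only [auto_label_room, hF0, hF1, hF2, hT, Bool.false_eq_true, if_false, if_true]
    rw [if_pos (by omega : (3:Int) < 5)]
    decide
  · have hF0 := cat_false room af 0 ["toilet", "sink_bathroom", "bathtub", "shower_stall"] (Or.inl ⟨rfl, rfl⟩) (hno 0 (by omega))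
    have hF1 := cat_false room af 1 ["sink_kitchen", "refrigerator", "oven_range"] (Or.inr (Or.inl ⟨rfl, rfl⟩)) (hno 1 (by omega))
    have hF2 := cat_false room af 2 ["sofa_small", "sofa_large", "sofa_loveseat", "side_table", "armchair", "chair_modern"] (Or.inr (Or.inr (Or.inl ⟨rfl, rfl⟩))) (hno 2 (by omega))
    have hF3 := cat_false room af 3 ["dining_plate", "dining_table_set"] (Or.inr (Or.inr (Or.inr (Or.inl ⟨rfl, rfl⟩)))) (hno 3 (by omega))
    have hT := cat_true room af 4 ["bed"] (Or.inr (Or.inr (Or.inr (Or.inr ⟨rfl, rfl⟩)))) (hyes (by omega))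
    have hbed : ((af.filter (fun f =>
        (PySem.Dict.mk f).get? "room_id" == (PySem.Dict.mk room).get? "id")).map
        (fun f => (PySem.Dict.mk f).getD "type" "")).contains "bed" = true := by
      simpa using hT
    simp only [auto_label_room, hF0, hF1, hF2, hF3, hbed, Bool.false_eq_true, if_false, if_true]
    rw [if_pos (by omega : (4:Int) < 5)]
    decide
  · have hF0 := cat_false room af 0 ["toilet", "sink_bathroom", "bathtub", "shower_stall"] (Or.inl ⟨rfl, rfl⟩) (hno 0 (by omega))
    have hF1 := cat_false room af 1 ["sink_kitchen", "refrigerator", "oven_range"] (Or.inr (Or.inl ⟨rfl, rfl⟩)) (hno 1 (by omega))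
    have hF2 := cat_false room af 2 ["sofa_small", "sofa_large", "sofa_loveseat", "side_table", "armchair", "chair_modern"] (Or.inr (Or.inr (Or.inl ⟨rfl, rfl⟩))) (hno 2 (by omega))
    have hF3 := cat_false room af 3 ["dining_plate", "dining_table_set"] (Or.inr (Or.inr (Or.inr (Or.inl ⟨rfl, rfl⟩)))) (hno 3 (by omega))
    have hF4 := cat_false room af 4 ["bed"] (Or.inr (Or.inr (Or.inr (Or.inr ⟨rfl, rfl⟩)))) (hno 4 (by omega))
    have hbed : ((af.filter (fun f =>
        (PySem.Dict.mk f).get? "room_id" == (PySem.Dict.mk room).get? "id")).map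
        (fun f => (PySem.Dict.mk f).getD "type" "")).contains "bed" = false := by
      simpa using hF4
    simp only [auto_label_room, hF0, hF1, hF2, hF3, hbed, Bool.false_eq_true, if_false]
    rw [if_neg (by omega : ¬ (5:Int) < 5)]

-- ===== VERDICT (by name: the statement is the Claim_ definition above) =====
theorem auto_label_room_spec : Claim_equal_auto_label_room := by
  intro room af _ _
  unfold Spec_auto_label_room
  exact main_eq room af
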